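-- pv_equiv track=rewrite | github.com/amohnacs15/seven_contents_by_ai | src/utility/text_utils.py | groom_titles
-- ===== SOURCE A (Python) =====
-- no_space_header_pattern = [
--     '#a',
--     '#B',
--     '#C',
--     '#D',
--     '#E',
--     '#F',
--     '#G',
--     '#H',
--     '#I',
--     '#J',
--     '#K',
--     '#L',
--     '#M',
--     '#N',
--     '#O',
--     '#P',
--     '#Q',
--     '#R',
--     '#S',
--     '#T',
--     '#U',
--     '#V',
--     '#W',
--     '#X',
--     '#Y',
--     '#Z',
-- ]
--
-- def groom_titles(input_string):
--     for check in no_space_header_pattern: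
--         split = list(check)
--         solution = f'{split[0]} {split[1]}'
--         input_string = input_string.replace(check, solution)
--     input_string = input_string.replace("H2", "")
--     input_string = input_string.replace("H2 -", "")
--
--     return input_string
-- ===== SOURCE B (Python) =====
-- no_space_header_pattern = [
--     '#a', '#B', '#C', '#D', '#E', '#F', '#G', '#H', '#I', '#J', '#K', '#L',
--     '#M', '#N', '#O', '#P', '#Q', '#R', '#S', '#T', '#U', '#V', '#W', '#X',
--     '#Y', '#Z',
-- ]
--
-- def groom_titles(input_string):
--     # one left-to-right pass driven by a membership set instead of 26 replace passes
--     letters = {p[1] for p in no_space_header_pattern}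
--     out = []
--     i = 0
--     n = len(input_string)
--     while i < n:
--         c = input_string[i]
--         if c == '#' and i + 1 < n and input_string[i + 1] in letters:
--             out.append('# ' + input_string[i + 1])
--             i += 2
--         else:
--             out.append(c)
--             i += 1
--     return ''.join(out).replace('H2', '').replace('H2 -', '')
-- ===== Notes on version B (the rewrite author's own statement) =====
-- stated objective: alternative
-- what changed: Replaces A's 26 whole-string .replace passes (one per header pattern) by a single left-to-right scan over the string driven by a set of the patterns' second letters, keeping the trailing H2 replaces.
import Mathlib
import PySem

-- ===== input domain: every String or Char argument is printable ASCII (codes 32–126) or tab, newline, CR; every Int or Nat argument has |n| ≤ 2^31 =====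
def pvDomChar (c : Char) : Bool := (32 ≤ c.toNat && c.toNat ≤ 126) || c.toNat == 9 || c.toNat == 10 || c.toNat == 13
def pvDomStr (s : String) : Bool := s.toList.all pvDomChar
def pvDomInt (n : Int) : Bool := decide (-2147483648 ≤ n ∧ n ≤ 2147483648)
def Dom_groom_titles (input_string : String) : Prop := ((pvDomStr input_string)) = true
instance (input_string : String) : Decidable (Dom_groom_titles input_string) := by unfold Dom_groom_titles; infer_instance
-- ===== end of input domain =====

-- B replaces A's 26 whole-string .replace passes by one left-to-right scan driven by a
-- set of the patterns' second letters (objective: alternative decomposition, same result).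

-- the module-level pattern table (shared context of both programs)
def no_space_header_pattern : List String :=
  ["#a", "#B", "#C", "#D", "#E", "#F", "#G", "#H", "#I", "#J", "#K", "#L", "#M",
   "#N", "#O", "#P", "#Q", "#R", "#S", "#T", "#U", "#V", "#W", "#X", "#Y", "#Z"]

-- ===== PORT A =====
def groom_titles (input_string : String) : String :=
  let s1 := no_space_header_pattern.foldl (fun acc check =>
    let split := check.toList
    -- split[0] / split[1]: every pattern is a 2-char literal, so pyGet? is always `some`
    let solution := String.ofList [(PySem.List.pyGet? split 0).getD ' ', ' ',
                                   (PySem.List.pyGet? split 1).getD ' ']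
    PySem.Str.replace acc check solution) input_string
  let s2 := PySem.Str.replace s1 "H2" ""
  let s3 := PySem.Str.replace s2 "H2 -" ""
  s3

-- ===== PORT B =====
-- letters = {p[1] for p in no_space_header_pattern}
def bLetters : PySem.Set Char :=
  PySem.Set.ofList (no_space_header_pattern.map (fun p => (PySem.List.pyGet? p.toList 1).getD ' '))

-- the while-loop over the index i: at each position look at the 2-char window
def bScan (letters : PySem.Set Char) : List Char → List Char
  | c :: d :: t =>
    if c == '#' && letters.contains d then c :: ' ' :: d :: bScan letters t
    else c :: bScan letters (d :: t)
  | l => l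

def groom_titles_alt (input_string : String) : String :=
  let joined := String.ofList (bScan bLetters input_string.toList)
  PySem.Str.replace (PySem.Str.replace joined "H2" "") "H2 -" ""

-- ===== PRECONDITION & SPEC =====
def Spec_groom_titles (input_string : String) (out : String) : Prop := out = groom_titles_alt input_string
instance (input_string : String) (out : String) : Decidable (Spec_groom_titles input_string out) := by unfold Spec_groom_titles; infer_instance

-- ===== CLAIM (what is proved, stated in full; the proofs are below) =====
def Claim_equal_groom_titles : Prop := ∀ (input_string : String), Dom_groom_titles input_string → Spec_groom_titles input_string (groom_titles input_string)

-- ===== LEMMAS AND PROOFS =====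

-- the 26 second letters of the pattern table, as a plain literal list
def pvLetters : List Char :=
  ['a','B','C','D','E','F','G','H','I','J','K','L','M','N','O','P','Q','R','S','T','U','V','W','X','Y','Z']

lemma bLetters_eq : bLetters = pvLetters := by decide

lemma pats_eq : no_space_header_pattern.map String.toList = pvLetters.map (fun c => ['#', c]) := by decide

lemma bScan_nil (L : PySem.Set Char) : bScan L [] = [] := rfl

lemma bScan_single (L : PySem.Set Char) (c : Char) : bScan L [c] = [c] := rfl

lemma bScan_cons_head (L : PySem.Set Char) (c : Char) (hc : c ≠ '#') (t : List Char) :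
    bScan L (c :: t) = c :: bScan L t := by
  cases t with
  | nil => rfl
  | cons d t' => rw [bScan]; simp [hc]

lemma head?_bScan (L : PySem.Set Char) (l : List Char) : (bScan L l).head? = l.head? := by
  match l with
  | [] => rfl
  | [c] => rfl
  | c :: d :: t => rw [bScan]; split <;> rfl

lemma bScan_empty (l : List Char) : bScan ([] : PySem.Set Char) l = l := by
  match l with
  | [] => rfl
  | [c] => rfl
  | c :: d :: t =>
    rw [bScan]
    simp [PySem.Set.contains, bScan_empty (d :: t)]

-- Python str.replace of the 2-char pattern "#b" by "# b" IS the single-letter scan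
lemma replace_go_scan (b : Char) :
    ∀ (fuel : Nat) (l acc : List Char), l.length ≤ fuel →
      PySem.Chars.replace.go ['#', b] ['#', ' ', b] fuel l acc
        = acc.reverse ++ bScan [b] l := by
  intro fuel
  induction fuel with
  | zero =>
    intro l acc hl
    have hnil : l = [] := by cases l with | nil => rfl | cons c t => simp at hl
    subst hnil
    simp [PySem.Chars.replace.go, bScan_nil]
  | succ n ih =>
    intro l acc hl
    match l with
    | [] => simp [PySem.Chars.replace.go, bScan_nil]
    | c :: t =>
      rw [PySem.Chars.replace.go]
      by_cases hpre : List.isPrefixOf ['#', b] (c :: t) = true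
      · match t with
        | [] => simp [List.isPrefixOf] at hpre
        | b' :: t' =>
          have hcb : c = '#' ∧ b = b' := by
            have := hpre
            simp [List.isPrefixOf] at this
            exact ⟨this.1.symm, this.2⟩
          obtain ⟨hc, hb⟩ := hcb
          subst hc; subst hb
          rw [if_pos hpre]
          have ht' : t'.length ≤ n := by simp at hl; omega
          have hdrop : List.drop (['#', b].length) ('#' :: b :: t') = t' := by simp
          rw [hdrop, ih t' _ ht']
          rw [bScan]
          have hcond : ('#' == '#' && PySem.Set.contains [b] b) = true := by
            simp [PySem.Set.contains]
          rw [if_pos hcond]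
          simp
      · rw [if_neg hpre]
        have ht : t.length ≤ n := by simp at hl; omega
        rw [ih t _ ht]
        cases t with
        | nil => simp [bScan_single, bScan_nil]
        | cons d t' =>
          have hcond : ¬ ((c == '#' && PySem.Set.contains [b] d) = true) := by
            simp only [PySem.Set.contains, List.contains_eq_mem, List.mem_singleton,
              Bool.and_eq_true, beq_iff_eq, decide_eq_true_eq]
            intro ⟨h1, h2⟩
            subst h1; subst h2
            simp [List.isPrefixOf] at hpre
          rw [bScan, if_neg hcond]
          simp

lemma replace_pair (b : Char) (s : List Char) :
    PySem.Chars.replace s ['#', b] ['#', ' ', b] = bScan [b] s := by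
  rw [PySem.Chars.replace]
  simpa using replace_go_scan b s.length s [] le_rfl

-- membership of d in a set given as a list, as the Bool the scan tests
lemma contains_iff (S : List Char) (d : Char) :
    PySem.Set.contains S d = true ↔ d ∈ S := by
  simp [PySem.Set.contains, List.contains_eq_mem]

-- composing one more single-letter scan onto an S-scan extends the letter set
lemma bScan_comp (x : Char) (hx1 : x ≠ '#') (hx2 : x ≠ ' ')
    (S : List Char) (hS : ∀ c ∈ S, c ≠ '#') :
    ∀ (n : Nat) (l : List Char), l.length ≤ n →
      bScan [x] (bScan S l) = bScan (S ++ [x]) l := by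
  intro n
  induction n with
  | zero =>
    intro l hl
    have hnil : l = [] := by cases l with | nil => rfl | cons c t => simp at hl
    subst hnil; rfl
  | succ n ih =>
    intro l hl
    match l with
    | [] => rfl
    | [c] => simp [bScan_single]
    | c :: d :: t =>
      have htn : t.length ≤ n := by simp at hl; omega
      have hdtn : (d :: t).length ≤ n := by simp at hl ⊢; omega
      by_cases hc : c = '#'
      · subst hc
        by_cases hd : d ∈ S
        · have hdH : d ≠ '#' := hS d hd
          have h1 : ('#' == '#' && PySem.Set.contains S d) = true := by
            simp [PySem.Set.contains, List.contains_eq_mem, hd]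
          rw [bScan, if_pos h1]
          have h2 : ¬ (('#' == '#' && PySem.Set.contains [x] ' ') = true) := by
            simp only [PySem.Set.contains, List.contains_eq_mem, List.mem_singleton,
              Bool.and_eq_true, beq_iff_eq, decide_eq_true_eq]
            exact fun ⟨_, h⟩ => hx2 h.symm
          rw [show bScan [x] ('#' :: ' ' :: d :: bScan S t)
                = '#' :: bScan [x] (' ' :: d :: bScan S t) from by rw [bScan, if_neg h2]]
          rw [bScan_cons_head [x] ' ' (by decide), bScan_cons_head [x] d hdH]
          rw [ih t htn]
          have h3 : ('#' == '#' && PySem.Set.contains (S ++ [x]) d) = true := by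
            simp [PySem.Set.contains, List.contains_eq_mem, hd]
          rw [bScan, if_pos h3]
        · have h1 : ¬ (('#' == '#' && PySem.Set.contains S d) = true) := by
            simp only [Bool.and_eq_true, beq_self_eq_true, true_and]
            exact fun h => hd ((contains_iff S d).mp h)
          rw [bScan, if_neg h1]
          by_cases hdx : d = x
          · subst hdx
            rw [bScan_cons_head S d hx1]
            have h2 : ('#' == '#' && PySem.Set.contains [d] d) = true := by
              simp [PySem.Set.contains, List.contains_eq_mem]
            rw [bScan, if_pos h2]
            rw [ih t htn]
            have h3 : ('#' == '#' && PySem.Set.contains (S ++ [d]) d) = true := by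
              simp [PySem.Set.contains, List.contains_eq_mem]
            rw [bScan, if_pos h3]
          · -- bScan S (d :: t) starts with d
            have hhead : (bScan S (d :: t)).head? = some d := by
              rw [head?_bScan]; rfl
            obtain ⟨M, hM⟩ : ∃ M, bScan S (d :: t) = d :: M := by
              cases hE : bScan S (d :: t) with
              | nil => rw [hE] at hhead; simp at hhead
              | cons e M =>
                rw [hE] at hhead
                simp at hhead
                exact ⟨M, by rw [hhead]⟩
            rw [hM]
            have h2 : ¬ (('#' == '#' && PySem.Set.contains [x] d) = true) := by
              simp only [PySem.Set.contains, List.contains_eq_mem, List.mem_singleton,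
                Bool.and_eq_true, beq_iff_eq, decide_eq_true_eq]
              exact fun ⟨_, h⟩ => hdx h
            rw [bScan, if_neg h2]
            rw [← hM, ih (d :: t) hdtn]
            have h3 : ¬ (('#' == '#' && PySem.Set.contains (S ++ [x]) d) = true) := by
              simp only [Bool.and_eq_true, beq_self_eq_true, true_and]
              intro h
              rcases List.mem_append.mp ((contains_iff (S ++ [x]) d).mp h) with h' | h'
              · exact hd h'
              · exact hdx (List.mem_singleton.mp h')
            rw [bScan, if_neg h3]
      · rw [bScan_cons_head S c hc, bScan_cons_head [x] c hc, ih (d :: t) hdtn,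
            bScan_cons_head (S ++ [x]) c hc]

-- A's fold of single-pattern replaces, pushed to the char-list level
lemma foldA (P : List String) :
    ∀ (L : List Char), P.map String.toList = L.map (fun c => ['#', c]) →
    ∀ (s : String),
      ((P.foldl (fun acc check =>
          let split := check.toList
          let solution := String.ofList [(PySem.List.pyGet? split 0).getD ' ', ' ',
                                         (PySem.List.pyGet? split 1).getD ' ']
          PySem.Str.replace acc check solution) s).toList
        = L.foldl (fun acc c => bScan [c] acc) s.toList) := by
  induction P with
  | nil =>
    intro L hL s
    cases L with
    | nil => simp
    | cons c L' => simp at hL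
  | cons p P ih =>
    intro L hL s
    cases L with
    | nil => simp at hL
    | cons c L' =>
      simp only [List.map_cons, List.cons.injEq] at hL
      obtain ⟨hp, hPL⟩ := hL
      simp only [List.foldl_cons]
      rw [ih L' hPL]
      congr 1
      rw [PySem.Str.toList_replace, hp, String.toList_ofList]
      rw [show (PySem.List.pyGet? ['#', c] 0).getD ' ' = '#' from rfl,
          show (PySem.List.pyGet? ['#', c] 1).getD ' ' = c from rfl]
      exact replace_pair c s.toList

-- folding the single-letter scans accumulates the whole letter set
lemma fold_scan :
    ∀ (Ls : List Char), (∀ c ∈ Ls, c ≠ '#' ∧ c ≠ ' ') →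
    ∀ (S : List Char), (∀ c ∈ S, c ≠ '#') →
    ∀ (l : List Char),
      Ls.foldl (fun acc x => bScan [x] acc) (bScan S l) = bScan (S ++ Ls) l := by
  intro Ls
  induction Ls with
  | nil => intro _ S _ l; simp
  | cons x Ls ih =>
    intro hLs S hS l
    rw [List.foldl_cons]
    rw [bScan_comp x (hLs x (by simp)).1 (hLs x (by simp)).2 S hS l.length l le_rfl]
    rw [ih (fun c hc => hLs c (by simp [hc])) (S ++ [x])
        (fun c hc => by
          rcases List.mem_append.mp hc with h' | h'
          · exact hS c h'
          · rw [List.mem_singleton.mp h']; exact (hLs x (by simp)).1) l]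
    rw [List.append_assoc]
    rfl

-- the letters of the table are neither '#' nor ' '
lemma pvLetters_ok : ∀ c ∈ pvLetters, c ≠ '#' ∧ c ≠ ' ' := by
  have hb : pvLetters.all (fun c => c != '#' && c != ' ') = true := by decide
  intro c hc
  have h := List.all_eq_true.mp hb c hc
  simpa using h

-- the core identity: A's 26 replace passes equal B's one scan
lemma core_eq (s : String) :
    (no_space_header_pattern.foldl (fun acc check =>
        let split := check.toList
        let solution := String.ofList [(PySem.List.pyGet? split 0).getD ' ', ' ',
                                       (PySem.List.pyGet? split 1).getD ' ']
        PySem.Str.replace acc check solution) s)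
      = String.ofList (bScan bLetters s.toList) := by
  have h1 := foldA no_space_header_pattern pvLetters pats_eq s
  have h2 := fold_scan pvLetters pvLetters_ok [] (by simp) s.toList
  rw [bScan_empty] at h2
  simp only [List.nil_append] at h2
  rw [h2] at h1
  calc (no_space_header_pattern.foldl _ s)
      = String.ofList (no_space_header_pattern.foldl _ s).toList := String.ofList_toList.symm
    _ = String.ofList (bScan bLetters s.toList) := by rw [h1, bLetters_eq]

-- ===== VERDICT (by name: the statement is the Claim_ definition above) =====
theorem groom_titles_spec : Claim_equal_groom_titles := by
  intro s _
  unfold Spec_groom_titles groom_titles groom_titles_alt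
  simp only
  rw [core_eq s]
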